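-- pv_equiv track=rewrite | github.com/chaeshee0908/BOJ-Programmers | toss/멋쟁이숫자.py | find_nice_num
-- ===== SOURCE A (Python) =====
-- def find_nice_num(s):
--     nice_num = []
--     s_arr = list(s)
--     if len(s_arr) < 3:
--         return '-1'
--     for i in range(len(s_arr)-2):
--         a, b, c = s_arr[i], s_arr[i+1], s_arr[i+2]
--         if a == b == c:
--             nice_num.append(a+b+c)
--     if nice_num:
--         if max(nice_num) == '000':
--             return '0'
--         return max(nice_num)
--     else:
--         return '-1'
-- ===== SOURCE B (Python) =====
-- def find_nice_num(s):
--     best = None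
--     prev = None
--     cnt = 0
--     for ch in list(s):
--         if ch == prev:
--             cnt += 1
--         else:
--             prev = ch
--             cnt = 1
--         if cnt >= 3 and (best is None or best < ch):
--             best = ch
--     if best is None:
--         return '-1'
--     if best == '0':
--         return '0'
--     return best * 3
-- ===== Notes on version B (the rewrite author's own statement) =====
-- stated objective: alternative
-- what changed: Replaced A's sliding window over index triples plus list accumulation and final max() by a single run-length scan that keeps only the current run's character/length and the single best qualifying character, rendering the answer directly (best*3) with no intermediate list.
import Mathlib
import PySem

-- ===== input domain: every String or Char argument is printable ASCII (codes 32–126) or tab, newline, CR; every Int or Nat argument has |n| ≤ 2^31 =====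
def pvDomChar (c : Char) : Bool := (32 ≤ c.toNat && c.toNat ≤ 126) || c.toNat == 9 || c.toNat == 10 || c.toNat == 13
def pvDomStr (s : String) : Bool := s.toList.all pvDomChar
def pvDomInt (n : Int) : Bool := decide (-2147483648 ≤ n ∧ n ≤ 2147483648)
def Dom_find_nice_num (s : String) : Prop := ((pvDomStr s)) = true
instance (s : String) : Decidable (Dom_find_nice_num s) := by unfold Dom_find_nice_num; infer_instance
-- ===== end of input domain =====

-- B replaces A's sliding window over index triples + list accumulation + final max()
-- by a one-pass run-length scan keeping only the current run and the best qualifying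
-- character (objective: alternative decomposition, O(1) extra space).

-- ===== PORT A =====
-- literal port of A; Python's in-range indexing s_arr[i] is pyGetD (the default ' ' is
-- never used: every index the loop produces is in range)
def find_nice_num (s : String) : String :=
  let s_arr := s.toList
  if s_arr.length < 3 then "-1"
  else
    let nice_num : List (List Char) :=
      (PySem.List.pyRange 0 ((s_arr.length : Int) - 2) 1).foldl
        (fun acc i =>
          let a := PySem.List.pyGetD s_arr i ' '
          let b := PySem.List.pyGetD s_arr (i + 1) ' '
          let c := PySem.List.pyGetD s_arr (i + 2) ' '
          if a = b ∧ b = c then acc ++ [[a, b, c]] else acc) []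
    -- Python: `if nice_num: … max(nice_num) …  else: return '-1'`; max on a nonempty
    -- list never raises, so the none-branch of max? is exactly the empty-list else-branch
    match PySem.List.max? nice_num (fun x => x) with
    | some m => if m = ['0', '0', '0'] then "0" else String.ofList m
    | none => "-1"

-- ===== PORT B =====
-- loop body of B: run-length state (prev, cnt, best)
def bstep (st : Option Char × Nat × Option Char) (ch : Char) : Option Char × Nat × Option Char :=
  let pc := if st.1 = some ch then (st.1, st.2.1 + 1) else (some ch, 1)
  let ok : Bool := decide (3 ≤ pc.2) &&
    (match st.2.2 with | none => true | some b => decide (b < ch))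
  (pc.1, pc.2, if ok then some ch else st.2.2)

def find_nice_num_alt (s : String) : String :=
  match (s.toList.foldl bstep (none, 0, none)).2.2 with
  | none => "-1"
  | some b => if b = '0' then "0" else String.ofList (List.replicate 3 b)

-- ===== PRECONDITION & SPEC =====
def Spec_find_nice_num (s : String) (out : String) : Prop := out = find_nice_num_alt s
instance (s : String) (out : String) : Decidable (Spec_find_nice_num s out) := by unfold Spec_find_nice_num; infer_instance

-- ===== CLAIM (what is proved, stated in full; the proofs are below) =====
def Claim_equal_find_nice_num : Prop := ∀ (s : String), Dom_find_nice_num s → Spec_find_nice_num s (find_nice_num s)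

-- ===== LEMMAS AND PROOFS =====

-- the three-copy string Python builds with a+b+c
def trip (c : Char) : List Char := [c, c, c]

-- chars that start a run of three equal consecutive characters, in order
def tr : List Char → List Char
  | a :: b :: c :: r => (if a = b ∧ b = c then [a] else []) ++ tr (b :: c :: r)
  | _ => []

-- max on Option Char
def omax : Option Char → Option Char → Option Char
  | none, y => y
  | some a, none => some a
  | some a, some b => some (max a b)

-- maximum of a char list
def M : List Char → Option Char
  | [] => none
  | a :: t => some (t.foldl max a)

-- common rendering of the result
def render : Option Char → String
  | none => "-1"
  | some q => if q = '0' then "0" else String.ofList [q, q, q]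

theorem trip_lt (a b : Char) : (trip a < trip b) ↔ a < b := by
  simp only [trip, List.cons_lt_cons_iff]
  constructor
  · rintro (h | ⟨rfl, h | ⟨_, h | ⟨_, h⟩⟩⟩)
    · exact h
    · exact h
    · exact h
    · exact absurd h (by simp)
  · intro h; exact Or.inl h

theorem omax_none_right (b : Option Char) : omax b none = b := by
  cases b <;> rfl

theorem omax_assoc (x y z : Option Char) : omax (omax x y) z = omax x (omax y z) := by
  cases x <;> cases y <;> cases z <;> simp [omax, max_assoc]

theorem omax_some_absorb (b : Option Char) (p : Char) :
    omax (omax b (some p)) (some p) = omax b (some p) := by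
  cases b <;> simp [omax]

theorem foldl_max_comm (t : List Char) : ∀ x y, t.foldl max (max x y) = max x (t.foldl max y) := by
  induction t with
  | nil => intro x y; rfl
  | cons z t ih =>
    intro x y
    simp only [List.foldl_cons, max_assoc]
    exact ih x (max y z)

theorem M_append (l1 l2 : List Char) : M (l1 ++ l2) = omax (M l1) (M l2) := by
  cases l1 with
  | nil => simp [M, omax]
  | cons a t =>
    cases l2 with
    | nil => simp [M, omax_none_right]
    | cons c t2 =>
      show M (a :: (t ++ c :: t2)) = _
      simp only [M, omax, List.foldl_append, List.foldl_cons]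
      rw [foldl_max_comm]

theorem foldl_max_replicate (j : Nat) (p : Char) : (List.replicate j p).foldl max p = p := by
  induction j with
  | zero => rfl
  | succ j ih => simp [List.replicate_succ, List.foldl_cons, max_self, ih]

theorem M_replicate (j : Nat) (p : Char) :
    M (List.replicate j p) = if j = 0 then none else some p := by
  cases j with
  | zero => rfl
  | succ j => simp [List.replicate_succ, M, foldl_max_replicate]

theorem tr_cons (a : Char) (l : List Char) :
    tr (a :: l) = (match l with
      | b :: c :: _ => if a = b ∧ b = c then [a] else []
      | _ => []) ++ tr l := by
  match l with
  | [] => rfl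
  | [b] => rfl
  | b :: c :: r => rfl

theorem tr_short (cs : List Char) (h : cs.length < 3) : tr cs = [] := by
  match cs, h with
  | [], _ => rfl
  | [a], _ => rfl
  | [a, b], _ => rfl

theorem tr_replicate (k : Nat) (p : Char) :
    tr (List.replicate k p) = List.replicate (k - 2) p := by
  induction k with
  | zero => rfl
  | succ k ih =>
    rw [List.replicate_succ, tr_cons, ih]
    cases k with
    | zero => rfl
    | succ k' =>
      cases k' with
      | zero => rfl
      | succ k'' => simp [List.replicate_succ]

theorem tr_rep_cons (j : Nat) (p : Char) (r : List Char) (h : 3 ≤ j) :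
    tr (List.replicate j p ++ r) = p :: tr (List.replicate (j - 1) p ++ r) := by
  obtain ⟨j', rfl⟩ : ∃ j', j = j' + 3 := ⟨j - 3, by omega⟩
  show tr (List.replicate (j' + 3) p ++ r) = p :: tr (List.replicate (j' + 2) p ++ r)
  simp only [List.replicate_succ, List.cons_append]
  rw [tr_cons]
  simp

theorem tr_boundary (p ch : Char) (r : List Char) (h : p ≠ ch) :
    ∀ k, tr (List.replicate k p ++ ch :: r) = List.replicate (k - 2) p ++ tr (ch :: r) := by
  intro k
  induction k with
  | zero => simp
  | succ k ih =>
    rw [List.replicate_succ, List.cons_append, tr_cons, ih]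
    cases k with
    | zero =>
      cases r with
      | nil => simp
      | cons c r' => simp [h]
    | succ k' =>
      cases k' with
      | zero => simp [List.replicate_succ, h]
      | succ k'' => simp [List.replicate_succ]

-- A's accumulation loop, at the Nat-range level, produces exactly the triples of tr
theorem A_chars : ∀ (cs : List Char) (acc : List (List Char)),
    (List.range (cs.length - 2)).foldl
      (fun acc k =>
        if cs.getD k ' ' = cs.getD (k+1) ' ' ∧ cs.getD (k+1) ' ' = cs.getD (k+2) ' '
        then acc ++ [[cs.getD k ' ', cs.getD (k+1) ' ', cs.getD (k+2) ' ']] else acc) acc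
      = acc ++ (tr cs).map trip
  | [], acc => by simp [tr]
  | [a], acc => by simp [tr]
  | [a, b], acc => by simp [tr]
  | a :: b :: c :: r, acc => by
    have ih := A_chars (b :: c :: r)
    have hlen : (a :: b :: c :: r).length - 2 = ((b :: c :: r).length - 2) + 1 := by simp
    rw [hlen, List.range_succ_eq_map, List.foldl_cons, List.foldl_map]
    have harith : ∀ k : Nat, k + 1 + 2 = k + 2 + 1 := fun _ => rfl
    have e : ∀ k : Nat, (a :: b :: c :: r).getD (k + 1) ' ' = (b :: c :: r).getD k ' ' := by
      intro k; simp
    have e2 : (b :: c :: r).getD 1 ' ' = c := rfl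
    simp only [Nat.succ_eq_add_one, harith, List.getD_cons_zero, e, e2]
    rw [ih]
    rw [tr_cons (a := a) (l := b :: c :: r)]
    by_cases hc : a = b ∧ b = c
    · obtain ⟨rfl, rfl⟩ := hc
      simp [trip]
    · simp [hc]

theorem maxTrip_aux : ∀ (t : List Char) (a : Char),
    (t.map trip).foldl
      (fun acc x =>
        match acc with
        | none => some x
        | some m => if m < x then some x else some m) (some (trip a))
      = some (trip (t.foldl max a)) := by
  intro t
  induction t with
  | nil => intro a; rfl
  | cons y t ih =>
    intro a
    rw [List.map_cons, List.foldl_cons, List.foldl_cons]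
    have hstep : (match some (trip a) with
        | none => some (trip y)
        | some m => if m < trip y then some (trip y) else some m) = some (trip (max a y)) := by
      show (if trip a < trip y then some (trip y) else some (trip a)) = _
      rcases lt_or_ge a y with h | h
      · rw [if_pos ((trip_lt a y).mpr h), max_eq_right (le_of_lt h)]
      · rw [if_neg (fun hl => absurd ((trip_lt a y).mp hl) (not_lt.mpr h)), max_eq_left h]
    rw [hstep, ih (max a y)]

theorem maxTrip (t : List Char) (a : Char) :
    PySem.List.max? ((a :: t).map trip) (fun x => x) = some (trip (t.foldl max a)) := by
  simp only [PySem.List.max?, List.map_cons, List.foldl_cons]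
  have h := maxTrip_aux t a
  convert h using 2
  funext acc x
  cases acc with
  | none => rfl
  | some m =>
    show (if m < x then some x else some m) = (if m < x then some x else some m)
    congr

theorem A_eq_render (s : String) : find_nice_num s = render (M (tr s.toList)) := by
  unfold find_nice_num
  by_cases hlen : s.toList.length < 3
  · rw [if_pos hlen, tr_short _ hlen]
    rfl
  · simp only [if_neg hlen]
    have hcast : ((s.toList.length : Int) - 2) = ((s.toList.length - 2 : Nat) : Int) := by omega
    rw [hcast, PySem.List.pyRange_one, List.foldl_map]
    have c0 : ∀ k : Nat, ((0 : Int) + (k : Int)) = ((k : Nat) : Int) := by intro k; omega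
    simp only [c0]
    have c1 : ∀ k : Nat, ((k : Int)) + 1 = ((k + 1 : Nat) : Int) := by intro k; omega
    have c2 : ∀ k : Nat, ((k : Int)) + 2 = ((k + 2 : Nat) : Int) := by intro k; omega
    simp only [c1, c2, PySem.List.pyGetD_natCast, sub_zero, Int.toNat_natCast]
    rw [A_chars s.toList []]
    rw [List.nil_append]
    cases htr : tr s.toList with
    | nil => simp [PySem.List.max?, M, render]
    | cons a t =>
      rw [maxTrip t a]
      by_cases hq : t.foldl max a = '0'
      · simp [trip, M, render, hq]
      · simp [trip, M, render, hq]

theorem B_inv (rest : List Char) : ∀ (p : Char) (k : Nat) (b : Option Char),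
    1 ≤ k → (3 ≤ k → omax b (some p) = b) →
    (rest.foldl bstep (some p, k, b)).2.2 = omax b (M (tr (List.replicate k p ++ rest))) := by
  induction rest with
  | nil =>
    intro p k b hk h3
    rw [List.foldl_nil, List.append_nil, tr_replicate, M_replicate]
    rcases Nat.lt_or_ge k 3 with h | h
    · have h0 : k - 2 = 0 := by omega
      simp [h0, omax_none_right]
    · have hne : ¬ (k - 2 = 0) := by omega
      simp only [if_neg hne]
      exact (h3 h).symm
  | cons ch r ih =>
    intro p k b hk h3
    rw [List.foldl_cons]
    by_cases hc : p = ch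
    · subst hc
      have hb : bstep (some p, k, b) p = (some p, k + 1, if 3 ≤ k + 1 then omax b (some p) else b) := by
        cases b with
        | none =>
          by_cases h31 : 3 ≤ k + 1 <;> simp [bstep, omax, h31]
        | some x =>
          by_cases h31 : 3 ≤ k + 1
          · rcases lt_or_ge x p with hxp | hxp
            · simp [bstep, omax, h31, hxp, max_eq_right (le_of_lt hxp)]
            · simp [bstep, omax, h31, not_lt.mpr hxp, max_eq_left hxp]
          · simp [bstep, h31]
      rw [hb]
      have hrep : List.replicate k p ++ p :: r = List.replicate (k + 1) p ++ r := by
        rw [List.replicate_succ']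
        simp
      by_cases h31 : 3 ≤ k + 1
      · rw [if_pos h31,
          ih p (k + 1) (omax b (some p)) (by omega) (fun _ => omax_some_absorb b p), hrep,
          omax_assoc]
        congr 1
        rw [tr_rep_cons (k + 1) p r h31]
        show omax (some p) (M (p :: tr (List.replicate (k + 1 - 1) p ++ r))) = _
        simp only [M, omax]
        rw [max_eq_right (PySem.List.le_foldl_max _ p).1]
      · rw [if_neg h31,
          ih p (k + 1) b (by omega) (fun hh => absurd hh h31), hrep]
    · have hb : bstep (some p, k, b) ch = (some ch, 1, b) := by
        simp [bstep, hc]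
      rw [hb, ih ch 1 b le_rfl (fun hh => by omega)]
      have h1 : List.replicate 1 ch ++ r = ch :: r := by simp
      rw [h1, tr_boundary p ch r hc k, M_append, M_replicate]
      rcases Nat.lt_or_ge k 3 with h | h
      · have h0 : k - 2 = 0 := by omega
        simp [h0, omax]
      · have hne : ¬ (k - 2 = 0) := by omega
        rw [if_neg hne, ← omax_assoc, h3 h]

theorem B_eq_render (s : String) : find_nice_num_alt s = render (M (tr s.toList)) := by
  unfold find_nice_num_alt
  cases s.toList with
  | nil => rfl
  | cons ch r =>
    rw [List.foldl_cons]
    have h1 : bstep (none, 0, none) ch = (some ch, 1, none) := by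
      simp [bstep]
    rw [h1, B_inv r ch 1 none le_rfl (fun hh => by omega)]
    have h2 : List.replicate 1 ch ++ r = ch :: r := by simp
    rw [h2]
    show (match M (tr (ch :: r)) with
      | none => "-1"
      | some b => if b = '0' then "0" else String.ofList (List.replicate 3 b)) = _
    cases M (tr (ch :: r)) with
    | none => rfl
    | some q => simp [render, List.replicate]

-- ===== VERDICT (by name: the statement is the Claim_ definition above) =====
theorem find_nice_num_spec : Claim_equal_find_nice_num := by
  intro s _
  unfold Spec_find_nice_num
  rw [A_eq_render, B_eq_render]
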